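-- pv_equiv track=rewrite | github.com/Szlonikk/Python-23-24 | Zestaw1/zad1.py | formatuj_wykladniki
-- ===== SOURCE A (Python) =====
-- def formatuj_wykladniki(czynniki):
--     wynik = ""
--     i = 0
--     while i < len(czynniki):
--         podstawa = czynniki[i]
--         wykladnik = 0
--         while i < len(czynniki) and czynniki[i] == podstawa:
--             wykladnik += 1
--             i += 1
--
--         if wykladnik == 1:
--             wynik += str(podstawa)
--         else:
--             wynik += f"{podstawa}^{wykladnik}"
--         if i < len(czynniki):
--             wynik += " * "
--     return wynik
-- ===== SOURCE B (Python) =====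
-- def _tok(v, c):
--     return str(v) if c == 1 else f"{v}^{c}"
--
--
-- def formatuj_wykladniki(czynniki):
--     n = len(czynniki)
--     bounds = [i for i in range(n) if i == 0 or czynniki[i] != czynniki[i - 1]] + [n]
--     return " * ".join(_tok(czynniki[s], e - s) for s, e in zip(bounds, bounds[1:]))
-- ===== Notes on version B (the rewrite author's own statement) =====
-- stated objective: faster
-- what changed: Instead of A's index-driven nested while loops with a run counter and inline ' * ' string concatenation, B first computes the list of run-boundary indices (positions where the value changes), derives each run's base and exponent by pairwise subtraction of consecutive boundaries, and joins the tokens once.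
import Mathlib
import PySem

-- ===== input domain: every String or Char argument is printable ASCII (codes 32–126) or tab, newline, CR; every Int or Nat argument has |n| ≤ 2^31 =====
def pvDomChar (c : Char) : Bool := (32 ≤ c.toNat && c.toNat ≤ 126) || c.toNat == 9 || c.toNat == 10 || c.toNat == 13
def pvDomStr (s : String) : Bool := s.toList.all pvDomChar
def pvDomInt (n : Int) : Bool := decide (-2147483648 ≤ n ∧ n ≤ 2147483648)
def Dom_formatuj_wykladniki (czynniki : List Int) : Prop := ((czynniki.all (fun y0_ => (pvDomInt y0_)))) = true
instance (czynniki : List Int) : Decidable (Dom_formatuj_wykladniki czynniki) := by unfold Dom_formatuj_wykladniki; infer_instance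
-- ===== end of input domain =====

-- B replaces A's index-driven nested while loops (run counter, inline " * " concatenation)
-- by a staged algorithm: compute the run-boundary index list, derive each base^exponent token
-- from consecutive boundary pairs by subtraction, join once (objective: alternative).

-- ===== PORT A =====
-- inner `while i < len(czynniki) and czynniki[i] == podstawa: wykladnik += 1; i += 1`;
-- returns (wykladnik, i); the fuel (= remaining length) only makes the loop total
def pvInnerA (cz : List Int) (podstawa : Int) : Nat → Nat → Nat → Nat × Nat
  | 0, i, wyk => (wyk, i)
  | fuel + 1, i, wyk =>
    if i < cz.length ∧ cz[i]! = podstawa then pvInnerA cz podstawa fuel (i + 1) (wyk + 1)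
    else (wyk, i)

-- outer while loop of A, state (i, wynik); fuel only makes the loop total
def pvOuterA (cz : List Int) : Nat → Nat → String → String
  | 0, _, wynik => wynik
  | fuel + 1, i, wynik =>
    if i < cz.length then
      let podstawa := cz[i]!
      let r := pvInnerA cz podstawa (cz.length - i) i 0
      let wynik2 := wynik ++ (if r.1 = 1 then PySem.Int.toStr podstawa
                              else PySem.Int.toStr podstawa ++ "^" ++ PySem.Int.toStr (r.1 : Int))
      let wynik3 := if r.2 < cz.length then wynik2 ++ " * " else wynik2
      pvOuterA cz fuel r.2 wynik3
    else wynik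

def formatuj_wykladniki (czynniki : List Int) : String :=
  pvOuterA czynniki (czynniki.length + 1) 0 ""

-- ===== PORT B =====
-- `_tok(v, c)` of Source B
def pvTok (v : Int) (c : Nat) : String :=
  if c = 1 then PySem.Int.toStr v else PySem.Int.toStr v ++ "^" ++ PySem.Int.toStr (c : Int)

-- `bounds = [i for i in range(n) if i == 0 or czynniki[i] != czynniki[i - 1]] + [n]`
def pvBounds (cz : List Int) : List Nat :=
  ((List.range cz.length).filter (fun i => i == 0 || !(cz[i]! == cz[i - 1]!))) ++ [cz.length]

-- `" * ".join(_tok(czynniki[s], e - s) for s, e in zip(bounds, bounds[1:]))`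
def formatuj_wykladniki_alt (czynniki : List Int) : String :=
  let bounds := pvBounds czynniki
  PySem.Str.join " * " ((bounds.zip bounds.tail).map (fun p => pvTok czynniki[p.1]! (p.2 - p.1)))

-- ===== PRECONDITION & SPEC =====
def Spec_formatuj_wykladniki (czynniki : List Int) (out : String) : Prop := out = formatuj_wykladniki_alt czynniki
instance (czynniki : List Int) (out : String) : Decidable (Spec_formatuj_wykladniki czynniki out) := by unfold Spec_formatuj_wykladniki; infer_instance

-- ===== CLAIM (what is proved, stated in full; the proofs are below) =====
def Claim_equal_formatuj_wykladniki : Prop := ∀ (czynniki : List Int), Dom_formatuj_wykladniki czynniki → Spec_formatuj_wykladniki czynniki (formatuj_wykladniki czynniki)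

-- ===== LEMMAS AND PROOFS =====

-- tokens of the run decomposition, with a pending run (cur, cnt)
def pendTokens (cur : Int) (cnt : Nat) : List Int → List String
  | [] => [pvTok cur cnt]
  | x :: xs => if x = cur then pendTokens cur (cnt + 1) xs else pvTok cur cnt :: pendTokens x 1 xs

-- what A's outer loop appends from position i on
def pvRest (cz : List Int) (i : Nat) : String :=
  if i < cz.length then PySem.Str.join " * " (pendTokens cz[i]! 1 (cz.drop (i + 1))) else ""

theorem strJoin_singleton (s t : String) : PySem.Str.join s [t] = t := by
  rw [← String.toList_inj, PySem.Str.toList_join]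
  simp [PySem.Chars.join_singleton]

theorem strJoin_cons_cons (s a b : String) (r : List String) :
    PySem.Str.join s (a :: b :: r) = a ++ s ++ PySem.Str.join s (b :: r) := by
  rw [← String.toList_inj]
  simp [PySem.Str.toList_join, PySem.Chars.join_cons_cons]

-- pendTokens in takeWhile/dropWhile form (exposes the head token)
theorem pendTokens_eq (l : List Int) (cur : Int) (cnt : Nat) :
    pendTokens cur cnt l
      = pvTok cur (cnt + (l.takeWhile (· == cur)).length)
          :: (if (l.dropWhile (· == cur)) = [] then []
              else pendTokens (l.dropWhile (· == cur)).head! 1 (l.dropWhile (· == cur)).tail) := by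
  induction l generalizing cnt with
  | nil => simp [pendTokens]
  | cons x xs ih =>
    by_cases hx : x = cur
    · have hb : (x == cur) = true := by simp [hx]
      simp only [pendTokens, if_pos hx, List.takeWhile_cons, List.dropWhile_cons, hb,
        if_true, List.length_cons, ih]
      congr 2
      omega
    · have hb : (x == cur) = false := by simp [hx]
      simp [pendTokens, hx, hb]

-- A side: the inner loop counts the leading run (for sufficient fuel)
theorem pvInnerA_spec (cz : List Int) (p : Int) :
    ∀ (fuel i w : Nat), cz.length - i ≤ fuel →
    pvInnerA cz p fuel i w
      = (w + ((cz.drop i).takeWhile (· == p)).length,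
         i + ((cz.drop i).takeWhile (· == p)).length) := by
  intro fuel
  induction fuel with
  | zero =>
    intro i w hf
    have : cz.drop i = [] := List.drop_eq_nil_of_le (by omega)
    simp [pvInnerA, this]
  | succ fuel ih =>
    intro i w hf
    by_cases h : i < cz.length ∧ cz[i]! = p
    · obtain ⟨hi, hp⟩ := h
      rw [pvInnerA, if_pos ⟨hi, hp⟩, ih (i + 1) (w + 1) (by omega)]
      have hd : cz.drop i = cz[i] :: cz.drop (i + 1) := List.drop_eq_getElem_cons hi
      have hgp : cz[i] = p := by rwa [getElem!_pos cz i hi] at hp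
      rw [hd, List.takeWhile_cons]
      simp only [hgp, BEq.rfl, if_true, List.length_cons, Prod.mk.injEq]
      omega
    · rw [pvInnerA, if_neg h]
      by_cases hi : i < cz.length
      · have hp : cz[i]! ≠ p := by tauto
        have hd : cz.drop i = cz[i] :: cz.drop (i + 1) := List.drop_eq_getElem_cons hi
        have hgp : cz[i] ≠ p := by rwa [getElem!_pos cz i hi] at hp
        rw [hd, List.takeWhile_cons]
        simp [hgp]
      · have : cz.drop i = [] := List.drop_eq_nil_of_le (by omega)
        simp [this]

-- A side: the outer loop appends pvRest (for sufficient fuel)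
theorem pvOuterA_spec (cz : List Int) :
    ∀ (fuel i : Nat) (wynik : String), cz.length - i ≤ fuel →
    pvOuterA cz fuel i wynik = wynik ++ pvRest cz i := by
  intro fuel
  induction fuel with
  | zero =>
    intro i wynik hf
    have h : ¬ i < cz.length := by omega
    rw [pvOuterA]
    unfold pvRest
    rw [if_neg h]
    simp
  | succ fuel ihn =>
    intro i wynik hf
    by_cases h : i < cz.length
    · rw [pvOuterA, if_pos h]
      have hget : cz[i] = cz[i]! := (getElem!_pos cz i h).symm
      have hinner : pvInnerA cz cz[i]! (cz.length - i) i 0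
          = (1 + ((cz.drop (i + 1)).takeWhile (· == cz[i]!)).length,
             (i + 1) + ((cz.drop (i + 1)).takeWhile (· == cz[i]!)).length) := by
        rw [pvInnerA_spec cz cz[i]! (cz.length - i) i 0 le_rfl,
            List.drop_eq_getElem_cons h, List.takeWhile_cons, hget]
        simp only [BEq.rfl, if_true, List.length_cons, Prod.mk.injEq]
        omega
      simp only [hinner]
      set k := ((cz.drop (i + 1)).takeWhile (· == cz[i]!)).length with hk
      have htok : (if (1 + k) = 1 then PySem.Int.toStr cz[i]!
                   else PySem.Int.toStr cz[i]! ++ "^" ++ PySem.Int.toStr ((1 + k : Nat) : Int))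
          = pvTok cz[i]! (1 + k) := rfl
      rw [htok, ihn ((i + 1) + k) _ (by omega)]
      have hdrop : cz.drop ((i + 1) + k) = (cz.drop (i + 1)).dropWhile (· == cz[i]!) := by
        rw [← List.drop_drop]
        conv_lhs => rw [← List.takeWhile_append_dropWhile (p := (· == cz[i]!)) (l := cz.drop (i + 1))]
        rw [hk, List.drop_left]
      have hpend := pendTokens_eq (cz.drop (i + 1)) cz[i]! 1
      rw [← hk, ← hdrop] at hpend
      by_cases hrest : (i + 1) + k < cz.length
      · have hne : cz.drop ((i + 1) + k) ≠ [] := by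
          intro hc
          rw [List.drop_eq_nil_iff] at hc
          omega
        have hcons : cz.drop ((i + 1) + k)
            = cz[(i + 1) + k] :: cz.drop (((i + 1) + k) + 1) := List.drop_eq_getElem_cons hrest
        have hget2 : cz[(i + 1) + k] = cz[(i + 1) + k]! := (getElem!_pos cz _ hrest).symm
        rw [if_pos hrest]
        unfold pvRest
        rw [if_pos h, if_pos hrest, hpend, if_neg hne]
        rw [hcons]
        simp only [List.head!_cons, List.tail_cons]
        rw [hget2, pendTokens_eq (cz.drop (((i + 1) + k) + 1)) cz[(i + 1) + k]! 1,
            strJoin_cons_cons, ← pendTokens_eq]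
        simp [String.append_assoc]
      · have hnil : cz.drop ((i + 1) + k) = [] := by
          rw [List.drop_eq_nil_iff]; omega
        rw [if_neg hrest]
        unfold pvRest
        rw [if_pos h, if_neg hrest, hpend, if_pos hnil, strJoin_singleton]
        simp
    · rw [pvOuterA, if_neg h]
      unfold pvRest
      rw [if_neg h]
      simp

-- ===== B side =====

-- the per-run token list (reference form both ports are reduced to)
def runToks : List Int → List String
  | [] => []
  | c :: l => pendTokens c 1 l

theorem runToks_cons (c : Int) (l : List Int) :
    runToks (c :: l)
      = pvTok c (1 + (l.takeWhile (· == c)).length) :: runToks (l.dropWhile (· == c)) := by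
  show pendTokens c 1 l = _
  rw [pendTokens_eq]
  cases hdw : l.dropWhile (· == c) with
  | nil =>
    rw [if_pos rfl]
    rfl
  | cons h0 t0 =>
    rw [if_neg (by simp)]
    simp only [List.head!_cons, List.tail_cons]
    rfl

def tokB (cz : List Int) : List String :=
  ((pvBounds cz).zip (pvBounds cz).tail).map (fun p => pvTok cz[p.1]! (p.2 - p.1))

theorem alt_eq_tokB (cz : List Int) :
    formatuj_wykladniki_alt cz = PySem.Str.join " * " (tokB cz) := rfl

-- in zip(l, l.tail) over l ++ [x], first components come from l
theorem zip_tail_fst_mem (l : List Nat) (x : Nat) (p : Nat × Nat)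
    (h : p ∈ (l ++ [x]).zip (l ++ [x]).tail) : p.1 ∈ l := by
  induction l with
  | nil => simp at h
  | cons a t ih =>
    cases htx : t ++ [x] with
    | nil => exact absurd htx (by simp)
    | cons b r =>
      simp only [List.cons_append, List.tail_cons, htx, List.zip_cons_cons, List.mem_cons] at h
      rcases h with h | h
      · simp [h]
      · have : p ∈ (t ++ [x]).zip (t ++ [x]).tail := by rw [htx]; simpa using h
        exact List.mem_cons_of_mem _ (ih this)

-- head of dropWhile fails the predicate
theorem dropWhile_head_false {α : Type} (q : α → Bool) (l : List α) (h0 : α) (t0 : List α)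
    (h : l.dropWhile q = h0 :: t0) : q h0 = false := by
  induction l with
  | nil => simp at h
  | cons a as ih =>
    rw [List.dropWhile_cons] at h
    split at h
    · exact ih h
    · cases h
      simpa using ‹¬ q h0 = true›

-- the boundary list always starts with 0
theorem pvBounds_head (r : List Int) : ∃ bt, pvBounds r = 0 :: bt := by
  cases r with
  | nil => exact ⟨[], rfl⟩
  | cons h0 t0 =>
    refine ⟨((List.range t0.length).map Nat.succ).filter
        (fun i => i == 0 || !((h0 :: t0)[i]! == (h0 :: t0)[i - 1]!)) ++ [t0.length + 1], ?_⟩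
    unfold pvBounds
    rw [List.length_cons, List.range_succ_eq_map, List.filter_cons, if_pos (by simp),
        List.cons_append]

-- splitting the boundary list at the end of a constant prefix of length k
theorem pvBounds_split (cz r : List Int) (k : Nat) (hk : 1 ≤ k)
    (hlen : cz.length = k + r.length)
    (hconst : ∀ j, j + 1 < k → cz[j + 1]! = cz[j]!)
    (hbreak : 0 < r.length → (cz[k]! == cz[k - 1]!) = false)
    (hshift : ∀ j, j < r.length → cz[k + j]! = r[j]!) :
    pvBounds cz = 0 :: (pvBounds r).map (fun x => k + x) := by
  obtain ⟨k', rfl⟩ : ∃ k', k = k' + 1 := ⟨k - 1, by omega⟩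
  unfold pvBounds
  rw [hlen, List.range_add, List.filter_append]
  have hA : (List.range (k' + 1)).filter
      (fun i => i == 0 || !(cz[i]! == cz[i - 1]!)) = [0] := by
    rw [List.range_succ_eq_map, List.filter_cons, if_pos (by simp), List.filter_map]
    have hnil : (List.range k').filter
        ((fun i => i == 0 || !(cz[i]! == cz[i - 1]!)) ∘ Nat.succ) = [] := by
      rw [List.filter_eq_nil_iff]
      intro j hj hc
      rw [List.mem_range] at hj
      rw [Function.comp_apply] at hc
      have hc' : ((j + 1 : Nat) == 0 || !(cz[j + 1]! == cz[j + 1 - 1]!)) = true := hc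
      rw [hconst j (by omega), Nat.add_sub_cancel] at hc'
      simp at hc'
    rw [hnil]
    rfl
  have hB : ((List.range r.length).map (fun x => (k' + 1) + x)).filter
      (fun i => i == 0 || !(cz[i]! == cz[i - 1]!))
      = ((List.range r.length).filter
          (fun i => i == 0 || !(r[i]! == r[i - 1]!))).map (fun x => (k' + 1) + x) := by
    rw [List.filter_map]
    congr 1
    apply List.filter_congr
    intro j hj
    rw [List.mem_range] at hj
    rw [Function.comp_apply]
    cases j with
    | zero =>
      show (((k' + 1) + 0 : Nat) == 0 || !(cz[(k' + 1) + 0]! == cz[(k' + 1) + 0 - 1]!))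
          = (((0 : Nat) == 0) || !(r[(0 : Nat)]! == r[(0 : Nat) - 1]!))
      simp only [Nat.add_zero]
      rw [hbreak hj]
      simp
    | succ j' =>
      have e1 : cz[(k' + 1) + (j' + 1)]! = r[j' + 1]! := hshift (j' + 1) hj
      have e2 : cz[(k' + 1) + j']! = r[j']! := hshift j' (by omega)
      show (((k' + 1) + (j' + 1) : Nat) == 0 || !(cz[(k' + 1) + (j' + 1)]! == cz[(k' + 1) + (j' + 1) - 1]!))
          = (((j' + 1 : Nat) == 0) || !(r[j' + 1]! == r[j' + 1 - 1]!))
      have hidx : (k' + 1) + (j' + 1) - 1 = (k' + 1) + j' := by omega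
      rw [hidx, e1, e2, Nat.add_sub_cancel]
      simp
  rw [hA, hB, List.map_append]
  simp
-- peel the first token off the boundary-pair token list
theorem tokB_split (cz r : List Int) (k : Nat)
    (hb : pvBounds cz = 0 :: (pvBounds r).map (fun x => k + x))
    (hshift : ∀ j, j < r.length → cz[k + j]! = r[j]!) :
    tokB cz = pvTok cz[0]! k :: tokB r := by
  obtain ⟨bt, hbt⟩ := pvBounds_head r
  have hz : ((fun x => k + x) 0 :: List.map (fun x => k + x) bt).zip (List.map (fun x => k + x) bt)
      = List.map (Prod.map (fun x => k + x) (fun x => k + x)) ((0 :: bt).zip bt) := by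
    rw [← List.map_cons, List.zip_map]
  unfold tokB
  rw [hb, hbt, List.tail_cons, List.map_cons, List.zip_cons_cons]
  simp only [hz]
  rw [List.map_cons, List.map_map]
  congr 1
  apply List.map_congr_left
  intro q hq
  obtain ⟨s, e⟩ := q
  have heq : (0 : Nat) :: bt
      = (List.range r.length).filter (fun i => i == 0 || !(r[i]! == r[i - 1]!)) ++ [r.length] := by
    rw [← hbt]
    rfl
  have hq' : (s, e) ∈ (((List.range r.length).filter (fun i => i == 0 || !(r[i]! == r[i - 1]!)) ++ [r.length]).zip
      ((List.range r.length).filter (fun i => i == 0 || !(r[i]! == r[i - 1]!)) ++ [r.length]).tail) := by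
    rw [← heq, List.tail_cons]
    exact hq
  have hs := zip_tail_fst_mem _ _ _ hq'
  have hslt : s < r.length := List.mem_range.mp (List.mem_filter.mp hs).1
  show pvTok cz[k + s]! (k + e - (k + s)) = pvTok r[s]! (e - s)
  rw [hshift s hslt]
  congr 1
  omega

-- dropping the takeWhile prefix is dropWhile
theorem drop_takeWhile_len (c : Int) :
    ∀ (L : List Int), L.drop (L.takeWhile (· == c)).length = L.dropWhile (· == c)
  | [] => rfl
  | a :: as => by
    rw [List.takeWhile_cons, List.dropWhile_cons]
    by_cases hP : (a == c) = true
    · simp only [if_pos hP, List.length_cons, List.drop_succ_cons]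
      exact drop_takeWhile_len c as
    · simp only [if_neg hP]
      rfl

-- main structural lemma: the boundary pass produces the run tokens
theorem tokB_eq_runToks : ∀ cz : List Int, tokB cz = runToks cz
  | [] => rfl
  | c :: l => by
    have htlen : ∀ j, j < (l.takeWhile (· == c)).length → l[j]! = c := by
      intro j hjt
      obtain ⟨s, hs⟩ := List.takeWhile_prefix (p := (· == c)) (l := l)
      conv_lhs => rw [← hs]
      rw [List.getElem!_eq_getElem?_getD, List.getElem?_append_left hjt,
          List.getElem?_eq_getElem hjt]
      have hmem := List.mem_takeWhile_imp (l := l) (p := (· == c))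
        (List.getElem_mem hjt)
      simpa using hmem
    have hall : ∀ i, i < 1 + (l.takeWhile (· == c)).length → (c :: l)[i]! = c := by
      intro i hi
      match i, hi with
      | 0, _ => simp
      | (j + 1), hj =>
        rw [List.getElem!_eq_getElem?_getD, List.getElem?_cons_succ,
            ← List.getElem!_eq_getElem?_getD]
        exact htlen j (by omega)
    have hdropk : (c :: l).drop (1 + (l.takeWhile (· == c)).length) = l.dropWhile (· == c) := by
      rw [Nat.add_comm, List.drop_succ_cons]
      exact drop_takeWhile_len c l
    have hshift : ∀ j, j < (l.dropWhile (· == c)).length →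
        (c :: l)[(1 + (l.takeWhile (· == c)).length) + j]! = (l.dropWhile (· == c))[j]! := by
      intro j hj
      have h : ((c :: l).drop (1 + (l.takeWhile (· == c)).length))[j]?
          = (c :: l)[(1 + (l.takeWhile (· == c)).length) + j]? := List.getElem?_drop ..
      rw [hdropk] at h
      rw [List.getElem!_eq_getElem?_getD, List.getElem!_eq_getElem?_getD, ← h]
    have hbreak : 0 < (l.dropWhile (· == c)).length →
        ((c :: l)[1 + (l.takeWhile (· == c)).length]!
          == (c :: l)[1 + (l.takeWhile (· == c)).length - 1]!) = false := by
      intro hpos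
      cases hrr : l.dropWhile (· == c) with
      | nil => rw [hrr] at hpos; simp at hpos
      | cons h0 t0 =>
        have hh := dropWhile_head_false (· == c) l h0 t0 hrr
        have e1 : (c :: l)[1 + (l.takeWhile (· == c)).length + 0]!
            = (l.dropWhile (· == c))[0]! := hshift 0 hpos
        rw [Nat.add_zero] at e1
        have e0 : (l.dropWhile (· == c))[0]! = h0 := by rw [hrr]; simp
        have e2 : (c :: l)[1 + (l.takeWhile (· == c)).length - 1]! = c := hall _ (by omega)
        rw [e1, e0, e2]
        exact hh
    have hlen : (c :: l).length
        = (1 + (l.takeWhile (· == c)).length) + (l.dropWhile (· == c)).length := by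
      have h1 : (l.takeWhile (· == c)).length + (l.dropWhile (· == c)).length = l.length := by
        conv_rhs => rw [← List.takeWhile_append_dropWhile (p := (· == c)) (l := l)]
        rw [List.length_append]
      simp only [List.length_cons]
      omega
    have hconst : ∀ j, j + 1 < 1 + (l.takeWhile (· == c)).length →
        (c :: l)[j + 1]! = (c :: l)[j]! := by
      intro j hj
      rw [hall (j + 1) hj, hall j (by omega)]
    have hsplit := pvBounds_split (c :: l) (l.dropWhile (· == c))
      (1 + (l.takeWhile (· == c)).length) (by omega) hlen hconst hbreak hshift
    have htok := tokB_split (c :: l) (l.dropWhile (· == c))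
      (1 + (l.takeWhile (· == c)).length) hsplit hshift
    rw [htok, tokB_eq_runToks (l.dropWhile (· == c)), runToks_cons]
    have h0 : (c :: l)[(0 : Nat)]! = c := by simp
    rw [h0]
  termination_by cz => cz.length
  decreasing_by
    have := List.length_dropWhile_le (· == c) l
    simp only [List.length_cons]
    omega

-- ===== VERDICT (by name: the statement is the Claim_ definition above) =====
theorem formatuj_wykladniki_spec : Claim_equal_formatuj_wykladniki := by
  intro cz _
  unfold Spec_formatuj_wykladniki
  rw [formatuj_wykladniki, pvOuterA_spec cz (cz.length + 1) 0 "" (by omega), alt_eq_tokB,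
      tokB_eq_runToks]
  cases cz with
  | nil =>
    show "" ++ pvRest [] 0 = PySem.Str.join " * " (runToks [])
    unfold pvRest
    rw [if_neg (by simp)]
    show "" = PySem.Str.join " * " []
    rw [← String.toList_inj, PySem.Str.toList_join]
    rfl
  | cons c0 rest =>
    unfold pvRest
    rw [if_pos (by simp)]
    have h0 : (c0 :: rest)[(0 : Nat)]! = c0 := by simp
    rw [h0]
    have hdr : List.drop (0 + 1) (c0 :: rest) = rest := rfl
    rw [hdr]
    show "" ++ PySem.Str.join " * " (runToks (c0 :: rest))
        = PySem.Str.join " * " (runToks (c0 :: rest))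
    simp
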